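-- pv_equiv track=rewrite | github.com/ZaraGiraffe/ucu_labs | lab7/cmudict.py | dict_invert1
-- ===== SOURCE A (Python) =====
-- def dict_sort(dict: dict):
--     '''
--     sorts dict by keys
--     '''
--     res = {}
--     s = sorted(dict.keys())
--     for i in s:
--         res[i] = dict[i]
--     return res
--
-- def dict_invert1(dct: list):
--     '''
--     dict_invert for list
--     '''
--     res = {}
--     lst_count = {}
--     for i in dct:
--         lst_count[i[0]] = lst_count.get(i[0], 0) + 1
--     for i in dct:
--         if lst_count[i[0]] not in res:
--             res[lst_count[i[0]]] = set()
--         s = tuple([i[0], tuple(i[2])])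
--         res[lst_count[i[0]]].add(s)
--     return dict_sort(res)
-- ===== SOURCE B (Python) =====
-- def dict_invert1(dct: list):
--     '''
--     dict_invert for list: selection instead of distribution — for each distinct
--     count (ascending) build its set by filtering the whole list; no bucket dict,
--     no dict_sort rebuild.
--     '''
--     counts = {}
--     for e in dct:
--         counts[e[0]] = counts.get(e[0], 0) + 1
--     res = {}
--     for c in sorted(set(counts.values())):
--         res[c] = {(e[0], tuple(e[2])) for e in dct if counts[e[0]] == c}
--     return res
-- ===== Notes on version B (the rewrite author's own statement) =====
-- stated objective: alternative
-- what changed: Replaces A's distribution scheme (bucket each entry into a dict of sets keyed by its count, then sort the keys and rebuild the dict via dict_sort) by selection: compute counts, then loop over the sorted distinct count values and build each bucket directly with a set comprehension filtering the whole list; no bucket dict, no dict_sort rebuild.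
import Mathlib
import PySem

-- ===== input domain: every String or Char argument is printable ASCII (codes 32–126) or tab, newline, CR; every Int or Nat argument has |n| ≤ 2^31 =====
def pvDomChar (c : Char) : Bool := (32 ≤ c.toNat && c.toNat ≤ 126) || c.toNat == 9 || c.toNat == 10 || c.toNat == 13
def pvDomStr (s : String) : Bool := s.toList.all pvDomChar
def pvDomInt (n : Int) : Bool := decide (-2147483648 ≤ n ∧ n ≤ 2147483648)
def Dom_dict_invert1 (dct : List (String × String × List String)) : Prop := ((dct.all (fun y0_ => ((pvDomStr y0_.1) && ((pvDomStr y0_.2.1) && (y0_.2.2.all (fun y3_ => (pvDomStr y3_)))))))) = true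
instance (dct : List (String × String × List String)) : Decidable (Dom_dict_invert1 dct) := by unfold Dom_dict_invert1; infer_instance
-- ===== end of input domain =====

-- B replaces A's distribution scheme (bucket every entry into a dict keyed by its count, then sort the keys and
-- rebuild the dict) by selection: for each distinct count in ascending order, build that bucket by filtering the
-- whole list (objective: alternative; no speed claim). Neither version mutates its argument.

-- ===== PORT A =====
-- dict_sort: res = {}; for i in sorted(dict.keys()): res[i] = dict[i].  'dict[i]' never raises here
-- (every i comes from dict.keys()), so it is rendered as getD with an arbitrary default.
def dict_sortA (d : PySem.Dict Int (PySem.Set (String × List String))) :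
    PySem.Dict Int (PySem.Set (String × List String)) :=
  (PySem.List.sorted d.keys (fun x => x) false).foldl
    (fun r k => r.insert k (d.getD k PySem.Set.empty)) PySem.Dict.empty

def dict_invert1 (dct : List (String × String × List String)) : List (Int × List (String × List String)) :=
  -- lst_count[i[0]] = lst_count.get(i[0], 0) + 1
  let lst_count : PySem.Dict String Int :=
    dct.foldl (fun d i => d.insert i.1 (d.getD i.1 0 + 1)) PySem.Dict.empty
  -- second loop: res[c] = set() if absent, then res[c].add((i[0], tuple(i[2]))).
  -- 'lst_count[i[0]]' never raises (i[0] was counted in the first loop), rendered as getD 0.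
  let res : PySem.Dict Int (PySem.Set (String × List String)) :=
    dct.foldl (fun r i =>
      let c := lst_count.getD i.1 0
      let r' := if r.contains c then r else r.insert c PySem.Set.empty
      r'.insert c (PySem.Set.add (r'.getD c PySem.Set.empty) (i.1, i.2.2))) PySem.Dict.empty
  (dict_sortA res).items

-- ===== PORT B =====
def dict_invert1_alt (dct : List (String × String × List String)) : List (Int × List (String × List String)) :=
  -- counts[e[0]] = counts.get(e[0], 0) + 1
  let counts : PySem.Dict String Int :=
    dct.foldl (fun d e => d.insert e.1 (d.getD e.1 0 + 1)) PySem.Dict.empty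
  -- for c in sorted(set(counts.values())):  (sorted without key — order-independent consumption of the set)
  let cs : List Int := PySem.List.sorted (PySem.Set.ofList counts.values) (fun x => x) false
  -- res[c] = {(e[0], tuple(e[2])) for e in dct if counts[e[0]] == c}; 'counts[e[0]]' never raises, rendered getD 0
  let res : PySem.Dict Int (PySem.Set (String × List String)) :=
    cs.foldl (fun r c =>
      r.insert c (PySem.Set.ofList
        ((dct.filter (fun e => counts.getD e.1 0 == c)).map (fun e => (e.1, e.2.2))))) PySem.Dict.empty
  res.items

-- ===== PRECONDITION & SPEC =====
def Spec_dict_invert1 (dct : List (String × String × List String)) (out : List (Int × List (String × List String))) : Prop := out = dict_invert1_alt dct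
instance (dct : List (String × String × List String)) (out : List (Int × List (String × List String))) : Decidable (Spec_dict_invert1 dct out) := by unfold Spec_dict_invert1; infer_instance

-- ===== CLAIM (what is proved, stated in full; the proofs are below) =====
def Claim_equal_dict_invert1 : Prop := ∀ (dct : List (String × String × List String)), Dom_dict_invert1 dct → Spec_dict_invert1 dct (dict_invert1 dct)

-- ===== LEMMAS AND PROOFS =====

-- A's composite step (ensure-bucket, then overwrite with the enlarged set) is Dict.modify.
theorem stepA_eq_modify {β : Type} [BEq β] (r : PySem.Dict Int (PySem.Set β)) (c : Int) (v : β) :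
    (let r' := if r.contains c then r else r.insert c PySem.Set.empty
     r'.insert c (PySem.Set.add (r'.getD c PySem.Set.empty) v))
    = r.modify c PySem.Set.empty (fun s => PySem.Set.add s v) := by
  by_cases h : r.contains c = true
  · simp only [h, if_pos, PySem.Dict.modify]
  · simp only [Bool.not_eq_true] at h
    simp only [h, Bool.false_eq_true, if_false, PySem.Dict.modify,
      PySem.Dict.getD_insert_self, PySem.Dict.insert_insert_self,
      PySem.Dict.getD_of_not_contains r PySem.Set.empty h]

-- The value a modify-loop leaves at key c is the fold of the adds over the entries keyed c.
theorem getD_foldl_modify_add {α β : Type} [BEq β] (key : α → Int) (val : α → β) :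
    ∀ (l : List α) (d : PySem.Dict Int (PySem.Set β)) (c : Int),
    (l.foldl (fun d a => d.modify (key a) PySem.Set.empty (fun s => PySem.Set.add s (val a))) d).getD c PySem.Set.empty
      = (l.filter (fun a => key a == c)).foldl (fun s a => PySem.Set.add s (val a)) (d.getD c PySem.Set.empty) := by
  intro l
  induction l with
  | nil => intro d c; simp
  | cons a l ih =>
    intro d c
    simp only [List.foldl_cons, List.filter_cons]
    rw [ih]
    by_cases h : key a = c
    · simp [h]
    · have hb : (key a == c) = false := by simpa using h
      simp only [hb, Bool.false_eq_true, if_false]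
      rw [PySem.Dict.getD_modify]
      simp [Ne.symm h]

-- ===== VERDICT (by name: the statement is the Claim_ definition above) =====
theorem dict_invert1_spec : Claim_equal_dict_invert1 := by
  intro dct _
  unfold Spec_dict_invert1 dict_invert1 dict_invert1_alt dict_sortA
  dsimp only []
  -- the shared count dict, written once
  set cnt : PySem.Dict String Int :=
    dct.foldl (fun d i => d.insert i.1 (d.getD i.1 0 + 1)) PySem.Dict.empty with hcnt
  have hcounter : cnt = PySem.Dict.counter (dct.map (fun e => e.1)) := by
    rw [hcnt, ← PySem.Dict.foldl_insert_getD_add_one_eq_counter, List.foldl_map]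
  -- A's bucket loop is a modify loop
  have hA : dct.foldl (fun r i =>
      let c := cnt.getD i.1 0
      let r' := if r.contains c then r else r.insert c PySem.Set.empty
      r'.insert c (PySem.Set.add (r'.getD c PySem.Set.empty) (i.1, i.2.2))) PySem.Dict.empty
    = dct.foldl (fun r i => r.modify (cnt.getD i.1 0) PySem.Set.empty
        (fun s => PySem.Set.add s (i.1, i.2.2))) PySem.Dict.empty := by
    apply PySem.List.foldl_congr_mem'
    intro i _ r
    exact stepA_eq_modify r (cnt.getD i.1 0) (i.1, i.2.2)
  rw [hA]
  set resA := dct.foldl (fun r i => r.modify (cnt.getD i.1 0) PySem.Set.empty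
      (fun s => PySem.Set.add s (i.1, i.2.2))) PySem.Dict.empty with hresA
  -- A's keys are the distinct counts of the entries
  have hkA : resA.keys = PySem.Set.ofList (dct.map (fun e => cnt.getD e.1 0)) := by
    rw [hresA, PySem.Dict.keys_foldl_modify_key dct (fun e => cnt.getD e.1 0) PySem.Set.empty
      (fun _ i _ => PySem.Set.add _ (i.1, i.2.2)) PySem.Dict.empty]
    rw [PySem.Dict.keys_empty, PySem.Set.update_nil_left]
  -- the two key lists agree: same members, both nodup, both sorted by the identity
  have hkeys : PySem.List.sorted resA.keys (fun x => x) false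
      = PySem.List.sorted (PySem.Set.ofList cnt.values) (fun x => x) false := by
    apply PySem.List.sorted_eq_sorted_of_perm _ _ _ (fun a b h => h)
    rw [hkA]
    rw [List.perm_ext_iff_of_nodup (PySem.Set.nodup_ofList _) (PySem.Set.nodup_ofList _)]
    intro c
    rw [PySem.Set.mem_ofList, PySem.Set.mem_ofList, List.mem_map]
    have hv : cnt.values = (PySem.Set.ofList (dct.map (fun e => e.1))).map
        (fun k => ((dct.map (fun e => e.1)).count k : Int)) := by
      rw [hcounter]
      show (PySem.Dict.counter (dct.map (fun e => e.1))).items.map (fun p => p.2) = _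
      rw [PySem.Dict.items_counter, List.map_map]
      rfl
    rw [hv]
    constructor
    · rintro ⟨e, he, rfl⟩
      rw [List.mem_map]
      refine ⟨e.1, ?_, ?_⟩
      · rw [PySem.Set.mem_ofList, List.mem_map]; exact ⟨e, he, rfl⟩
      · rw [hcounter, PySem.Dict.getD_counter]
    · rw [List.mem_map]
      rintro ⟨k, hk, rfl⟩
      rw [PySem.Set.mem_ofList, List.mem_map] at hk
      obtain ⟨e, he, rfl⟩ := hk
      exact ⟨e, he, by rw [hcounter, PySem.Dict.getD_counter]⟩
  rw [hkeys]
  set cs := PySem.List.sorted (PySem.Set.ofList cnt.values) (fun x => x) false with hcs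
  have hnodup : cs.Nodup := by
    rw [hcs]
    exact (PySem.List.sorted_perm _ _ _).nodup_iff.mpr (PySem.Set.nodup_ofList _)
  -- both result dicts are fold-inserts over the same fresh distinct keys cs: items = the maps
  rw [PySem.Dict.items_foldl_insert_fresh cs (fun k => k)
      (fun k => resA.getD k PySem.Set.empty) PySem.Dict.empty
      (fun a _ => PySem.Dict.contains_empty a) (by simpa using hnodup),
    PySem.Dict.items_foldl_insert_fresh cs (fun c => c)
      (fun c => PySem.Set.ofList
        ((dct.filter (fun e => cnt.getD e.1 0 == c)).map (fun e => (e.1, e.2.2)))) PySem.Dict.empty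
      (fun a _ => PySem.Dict.contains_empty a) (by simpa using hnodup)]
  simp only [PySem.Dict.empty, List.nil_append]
  -- per-key values agree: A's bucket at c is exactly B's set comprehension for c
  refine List.map_congr_left (fun c _ => ?_)
  rw [hresA, getD_foldl_modify_add (fun e => cnt.getD e.1 0) (fun e => (e.1, e.2.2)) dct
      PySem.Dict.empty c, PySem.Dict.getD_empty]
  rw [show (PySem.Set.ofList ((dct.filter (fun e => cnt.getD e.1 0 == c)).map (fun e => (e.1, e.2.2))))
      = ((dct.filter (fun e => cnt.getD e.1 0 == c)).map (fun e => (e.1, e.2.2))).foldl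
          PySem.Set.add PySem.Set.empty from rfl,
    List.foldl_map]
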